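-- pv_equiv track=rewrite | github.com/mbaddar1/coding | encrypted_words.py | findEncryptedWord
-- ===== SOURCE A (Python) =====
-- def findEncryptedWord(s):
--     n = len(s)
--     if n == 0:
--         return ""
--     if n == 1 or n == 2:
--         return s
--     middle = int(n / 2) if n % 2 == 1 else int(n / 2) - 1
--     res = s[middle] + findEncryptedWord(s[:middle]) + findEncryptedWord(s[middle+1:])
--     return res
-- ===== SOURCE B (Python) =====
-- def findEncryptedWord(s):
--     # Iterative: explicit stack of (lo, hi) half-open index ranges, preorder.
--     out = []
--     stack = [(0, len(s))]
--     while stack: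
--         lo, hi = stack.pop()
--         L = hi - lo
--         if L == 0:
--             continue
--         if L <= 2:
--             out.append(s[lo:hi])
--             continue
--         mid = lo + (L // 2 if L % 2 == 1 else L // 2 - 1)
--         out.append(s[mid])
--         stack.append((mid + 1, hi))
--         stack.append((lo, mid))
--     return "".join(out)
-- ===== Notes on version B (the rewrite author's own statement) =====
-- stated objective: alternative
-- what changed: Replaced A's recursion on substring copies with an iterative explicit stack of (lo, hi) index ranges into the original string, emitting pieces in preorder and joining once at the end.
import Mathlib
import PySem

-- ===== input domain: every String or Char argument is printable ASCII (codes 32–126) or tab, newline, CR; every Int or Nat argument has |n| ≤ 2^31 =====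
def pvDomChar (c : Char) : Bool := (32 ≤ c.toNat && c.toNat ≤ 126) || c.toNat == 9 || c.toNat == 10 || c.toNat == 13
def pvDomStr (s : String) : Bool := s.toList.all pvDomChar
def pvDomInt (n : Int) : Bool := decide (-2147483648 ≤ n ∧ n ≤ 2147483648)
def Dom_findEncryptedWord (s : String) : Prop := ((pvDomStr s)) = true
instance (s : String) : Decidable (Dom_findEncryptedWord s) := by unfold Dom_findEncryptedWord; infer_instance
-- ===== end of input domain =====

-- B replaces A's recursion on substring copies with an explicit stack of (lo, hi) index ranges (same output; objective: alternative decomposition).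

-- ===== PORT A =====
-- A's recursion on the string's character list; the Nat fuel (≥ length) only makes the
-- recursion structural, it never alters the computation. 'int(n/2)' on the nonnegative n is n / 2.
-- s[middle] is in range in every recursive call (0 ≤ middle < n), so the total pyGetD form is exact here.
def fAAux : Nat → List Char → List Char
  | 0, _ => []    -- fuel guard only; never reached when fuel ≥ length
  | fuel + 1, l =>
    if l.length = 0 then []
    else if l.length = 1 ∨ l.length = 2 then l
    else
      let middle := if l.length % 2 = 1 then l.length / 2 else l.length / 2 - 1
      PySem.List.pyGetD l (middle : Int) ' ' ::
        (fAAux fuel (PySem.List.slice l none (some (middle : Int))) ++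
         fAAux fuel (PySem.List.slice l (some ((middle + 1 : Nat) : Int)) none))

def findEncryptedWord (s : String) : String := String.ofList (fAAux s.toList.length s.toList)

-- ===== PORT B =====
-- Source B's loop: pop a (lo, hi) range; the slice s[lo:hi] (0 ≤ lo ≤ hi always holds here) is
-- (s.drop lo).take (hi - lo); s[mid] is always in range here, ported as getD; Source B's local alias
-- L = hi - lo is inlined; the Nat fuel (≥ 2·total range length + stack length) only makes the
-- loop structural, it never alters the computation.
def bLoop (s : List Char) : Nat → List (Nat × Nat) → List (List Char) → List (List Char)
  | 0, _, acc => acc    -- fuel guard only; never reached with the initial fuel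
  | _ + 1, [], acc => acc
  | fuel + 1, (lo, hi) :: stk, acc =>
    if hi - lo = 0 then bLoop s fuel stk acc
    else if hi - lo ≤ 2 then bLoop s fuel stk (acc ++ [(s.drop lo).take (hi - lo)])
    else
      let mid := lo + (if (hi - lo) % 2 = 1 then (hi - lo) / 2 else (hi - lo) / 2 - 1)
      bLoop s fuel ((lo, mid) :: (mid + 1, hi) :: stk) (acc ++ [[s.getD mid ' ']])

def findEncryptedWord_alt (s : String) : String :=
  String.ofList ((bLoop s.toList (2 * s.toList.length + 1) [(0, s.toList.length)] []).flatten)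

-- ===== PRECONDITION & SPEC =====
def Spec_findEncryptedWord (s : String) (out : String) : Prop := out = findEncryptedWord_alt s
instance (s : String) (out : String) : Decidable (Spec_findEncryptedWord s out) := by unfold Spec_findEncryptedWord; infer_instance

-- ===== CLAIM (what is proved, stated in full; the proofs are below) =====
def Claim_equal_findEncryptedWord : Prop := ∀ (s : String), Dom_findEncryptedWord s → Spec_findEncryptedWord s (findEncryptedWord s)

-- ===== LEMMAS AND PROOFS =====

lemma fAAux_nil (f : Nat) : fAAux f [] = [] := by cases f <;> simp [fAAux]

-- the fuel is irrelevant as soon as it covers the list's length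
lemma fAAux_fuel : ∀ (f1 f2 : Nat) (l : List Char), l.length ≤ f1 → l.length ≤ f2 →
    fAAux f1 l = fAAux f2 l := by
  intro f1
  induction f1 with
  | zero =>
    intro f2 l h1 _
    have : l = [] := List.eq_nil_of_length_eq_zero (by omega)
    subst this
    simp [fAAux_nil]
  | succ f1 ih =>
    intro f2 l h1 h2
    cases f2 with
    | zero =>
      have : l = [] := List.eq_nil_of_length_eq_zero (by omega)
      subst this
      simp [fAAux_nil]
    | succ f2 =>
      by_cases h0 : l.length = 0
      · simp [fAAux, h0]
      · by_cases h12 : l.length = 1 ∨ l.length = 2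
        · simp [fAAux, h0, h12]
        · simp only [fAAux]
          rw [if_neg h0, if_neg h0, if_neg h12, if_neg h12]
          set middle := if l.length % 2 = 1 then l.length / 2 else l.length / 2 - 1 with hm
          have hmlt : middle < l.length := by rw [hm]; split_ifs <;> omega
          congr 1
          congr 1
          · apply ih
            · rw [PySem.List.slice_to_natCast]; simp; omega
            · rw [PySem.List.slice_to_natCast]; simp; omega
          · apply ih
            · rw [PySem.List.slice_from_natCast]; simp; omega
            · rw [PySem.List.slice_from_natCast]; simp; omega

lemma fAAux_short (f : Nat) (l : List Char) (hf : 1 ≤ f) (h : l.length = 1 ∨ l.length = 2) :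
    fAAux f l = l := by
  obtain ⟨g, rfl⟩ : ∃ g, f = g + 1 := ⟨f - 1, by omega⟩
  rw [fAAux, if_neg (by omega), if_pos h]

-- A on the range [lo, hi) splits into middle char, left range, right range
lemma fAAux_split (s : List Char) (lo hi k : Nat) (hhi : hi ≤ s.length) (h3 : 3 ≤ hi - lo)
    (hk : k = if (hi - lo) % 2 = 1 then (hi - lo) / 2 else (hi - lo) / 2 - 1) :
    fAAux (hi - lo) ((s.drop lo).take (hi - lo)) =
      s.getD (lo + k) ' ' ::
        (fAAux k ((s.drop lo).take k) ++
         fAAux (hi - (lo + k + 1)) ((s.drop (lo + k + 1)).take (hi - (lo + k + 1)))) := by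
  have hlen : ((s.drop lo).take (hi - lo)).length = hi - lo := by simp; omega
  have hk1 : 1 ≤ k := by subst hk; split_ifs <;> omega
  have hk2 : k ≤ hi - lo - 2 := by subst hk; split_ifs <;> omega
  obtain ⟨m, hmfuel⟩ : ∃ m, hi - lo = m + 1 := ⟨hi - lo - 1, by omega⟩
  have hhead : fAAux (hi - lo) ((s.drop lo).take (hi - lo)) =
      fAAux (m + 1) ((s.drop lo).take (hi - lo)) := by rw [← hmfuel]
  rw [hhead, fAAux]
  simp only [hlen]
  rw [if_neg (by omega), if_neg (by omega), ← hk]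
  have hget : PySem.List.pyGetD ((s.drop lo).take (hi - lo)) ((k : Nat) : Int) ' ' =
      s.getD (lo + k) ' ' := by
    rw [PySem.List.pyGetD_natCast]
    rw [List.getD_eq_getElem?_getD, List.getD_eq_getElem?_getD]
    rw [List.getElem?_take, List.getElem?_drop]
    simp [show k < hi - lo by omega]
  have hleft : PySem.List.slice ((s.drop lo).take (hi - lo)) none (some ((k : Nat) : Int)) =
      (s.drop lo).take k := by
    rw [PySem.List.slice_to_natCast, List.take_take]
    congr 1
    omega
  have hright : PySem.List.slice ((s.drop lo).take (hi - lo)) (some ((k + 1 : Nat) : Int)) none =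
      (s.drop (lo + k + 1)).take (hi - (lo + k + 1)) := by
    rw [PySem.List.slice_from_natCast, List.drop_take, List.drop_drop]
    congr 1 <;> omega
  rw [hget, hleft, hright]
  congr 1
  congr 1
  · apply fAAux_fuel
    all_goals simp
    all_goals omega
  · apply fAAux_fuel
    all_goals simp
    all_goals omega

-- the loop, on a stack of in-bounds ranges with enough fuel, produces the concatenation of
-- A's results on those ranges
lemma bLoop_eq (s : List Char) :
    ∀ (fuel : Nat) (stk : List (Nat × Nat)) (acc : List (List Char)),
      2 * (stk.map (fun p => p.2 - p.1)).sum + stk.length ≤ fuel →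
      (∀ p ∈ stk, p.1 ≤ p.2 ∧ p.2 ≤ s.length) →
      (bLoop s fuel stk acc).flatten =
        acc.flatten ++
          (stk.map (fun p => fAAux (p.2 - p.1) ((s.drop p.1).take (p.2 - p.1)))).flatten := by
  intro fuel
  induction fuel with
  | zero =>
    intro stk acc hm _
    cases stk with
    | nil => simp [bLoop]
    | cons p stk => simp [List.length_cons] at hm
  | succ fuel ih =>
    intro stk acc hm h
    match stk with
    | [] => simp [bLoop]
    | (lo, hi) :: stk =>
      have hb := h (lo, hi) (by simp)
      simp only [List.map_cons, List.sum_cons, List.length_cons] at hm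
      rw [bLoop]
      by_cases h0 : hi - lo = 0
      · rw [if_pos h0]
        rw [ih stk acc (by omega) (fun p hp => h p (by simp [hp]))]
        simp [h0, fAAux_nil]
      · rw [if_neg h0]
        by_cases h2 : hi - lo ≤ 2
        · rw [if_pos h2]
          rw [ih stk _ (by omega) (fun p hp => h p (by simp [hp]))]
          have hs := fAAux_short (hi - lo) ((s.drop lo).take (hi - lo)) (by omega) (by simp; omega)
          simp [hs]
        · rw [if_neg h2]
          show (bLoop s fuel
              ((lo, lo + if (hi - lo) % 2 = 1 then (hi - lo) / 2 else (hi - lo) / 2 - 1) ::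
               ((lo + if (hi - lo) % 2 = 1 then (hi - lo) / 2 else (hi - lo) / 2 - 1) + 1, hi) :: stk)
              (acc ++ [[s.getD (lo + if (hi - lo) % 2 = 1 then (hi - lo) / 2 else (hi - lo) / 2 - 1) ' ']])).flatten = _
          set k := (if (hi - lo) % 2 = 1 then (hi - lo) / 2 else (hi - lo) / 2 - 1) with hk
          have hk1 : 1 ≤ k := by rw [hk]; split_ifs <;> omega
          have hk2 : k ≤ hi - lo - 2 := by rw [hk]; split_ifs <;> omega
          rw [ih ((lo, lo + k) :: (lo + k + 1, hi) :: stk) _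
              (by simp only [List.map_cons, List.sum_cons, List.length_cons]; omega)
              (by
                intro p hp
                simp only [List.mem_cons] at hp
                rcases hp with rfl | rfl | hp
                · refine ⟨?_, ?_⟩ <;> simp <;> omega
                · refine ⟨?_, ?_⟩ <;> simp <;> omega
                · exact h p (by simp [hp]))]
          have hsplit := fAAux_split s lo hi k (by omega) (by omega) hk
          simp only [List.map_cons, List.flatten_cons]
          rw [Nat.add_sub_cancel_left, hsplit]
          simp

-- ===== VERDICT (by name: the statement is the Claim_ definition above) =====
theorem findEncryptedWord_spec : Claim_equal_findEncryptedWord := by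
  intro s _
  unfold Spec_findEncryptedWord findEncryptedWord findEncryptedWord_alt
  rw [bLoop_eq s.toList (2 * s.toList.length + 1) [(0, s.toList.length)] [] (by simp) (by simp)]
  simp only [List.map_cons, List.map_nil, List.flatten_cons, List.flatten_nil, Nat.sub_zero,
    List.drop_zero, List.take_length, List.append_nil, List.nil_append]
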